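-- pv_equiv track=rewrite | github.com/paulklemstine/factor | lean/demo/New/Research/demo_arithmetic_photons.py | find_quadruples
-- ===== SOURCE A (Python) =====
-- import math
--
-- def find_quadruples(max_d=30):
--     """Find all Pythagorean quadruples with d ≤ max_d."""
--     quads = []
--     for d in range(1, max_d + 1):
--         for a in range(0, d + 1):
--             for b in range(a, d + 1):
--                 remainder = d*d - a*a - b*b
--                 if remainder < 0:
--                     break
--                 c = int(math.isqrt(remainder))
--                 if c*c == remainder and b <= c:
--                     quads.append((a, b, c, d))
--     return quads
-- ===== SOURCE B (Python) =====
-- def find_quadruples(max_d=30):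
--     """Find all Pythagorean quadruples with d <= max_d.
--
--     Precompute a dict mapping s -> list of pairs (b, c) with b <= c and
--     b*b + c*c == s, then for each (d, a) look up d*d - a*a directly.
--     """
--     table = {}
--     for b in range(0, max_d + 1):
--         bb = b * b
--         for c in range(b, max_d + 1):
--             table.setdefault(bb + c * c, []).append((b, c))
--     quads = []
--     for d in range(1, max_d + 1):
--         dd = d * d
--         for a in range(0, d + 1):
--             for b, c in table.get(dd - a * a, ()):
--                 if b >= a:
--                     quads.append((a, b, c, d))
--     return quads
-- ===== Notes on version B (the rewrite author's own statement) =====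
-- stated objective: faster
-- what changed: Instead of scanning b and taking an integer square root for every (d,a,b), B precomputes one dict mapping each sum of two squares s to its ordered list of pairs (b,c) with b<=c, then for each (d,a) looks up d*d-a*a and emits the pairs with b>=a.
import Mathlib
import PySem

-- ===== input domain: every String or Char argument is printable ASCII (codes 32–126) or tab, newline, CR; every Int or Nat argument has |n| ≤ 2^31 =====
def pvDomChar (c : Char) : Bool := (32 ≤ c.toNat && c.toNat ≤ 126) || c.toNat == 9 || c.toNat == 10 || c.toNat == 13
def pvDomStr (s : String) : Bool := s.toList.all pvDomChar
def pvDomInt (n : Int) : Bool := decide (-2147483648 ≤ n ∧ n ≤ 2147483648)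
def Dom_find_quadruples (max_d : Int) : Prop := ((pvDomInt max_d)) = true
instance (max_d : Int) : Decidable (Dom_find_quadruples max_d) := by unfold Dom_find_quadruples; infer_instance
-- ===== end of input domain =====

-- B replaces A's cubic scan-with-isqrt by a precomputed dict from sums of two squares to their (b,c) pairs (objective: faster).


-- ===== PORT A =====
-- math.isqrt(r): exact for 0 ≤ r (A only calls it after the `remainder < 0` break check)
def pvISqrt (r : Int) : Int := (Nat.sqrt r.toNat : Int)

-- the inner `for b in range(a, d+1)` loop with its `break` (early return of the accumulator)
def pvBloopA (d a : Int) : List Int → List (List Int) → List (List Int)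
  | [], quads => quads
  | b :: rest, quads =>
    let rem := d * d - a * a - b * b
    if rem < 0 then quads
    else
      let c := pvISqrt rem
      pvBloopA d a rest (if c * c = rem ∧ b ≤ c then quads ++ [[a, b, c, d]] else quads)

def find_quadruples (max_d : Int) : List (List Int) :=
  (PySem.List.pyRange 1 (max_d + 1) 1).foldl (fun quads d =>
    (PySem.List.pyRange 0 (d + 1) 1).foldl (fun quads a =>
      pvBloopA d a (PySem.List.pyRange a (d + 1) 1) quads) quads) []

-- ===== PORT B =====
-- table: for b in 0..max_d, for c in b..max_d: table.setdefault(b*b+c*c, []).append((b, c))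
def pvTable (max_d : Int) : PySem.Dict Int (List (Int × Int)) :=
  (PySem.List.pyRange 0 (max_d + 1) 1).foldl (fun t b =>
    (PySem.List.pyRange b (max_d + 1) 1).foldl
      (fun t c => t.modify (b * b + c * c) [] (· ++ [(b, c)])) t)
    PySem.Dict.empty

def find_quadruples_alt (max_d : Int) : List (List Int) :=
  let table := pvTable max_d
  (PySem.List.pyRange 1 (max_d + 1) 1).foldl (fun quads d =>
    (PySem.List.pyRange 0 (d + 1) 1).foldl (fun quads a =>
      (table.getD (d * d - a * a) []).foldl
        (fun quads bc => if a ≤ bc.1 then quads ++ [[a, bc.1, bc.2, d]] else quads) quads) quads) []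

-- ===== PRECONDITION & SPEC =====
def Spec_find_quadruples (max_d : Int) (out : List (List Int)) : Prop := out = find_quadruples_alt max_d
instance (max_d : Int) (out : List (List Int)) : Decidable (Spec_find_quadruples max_d out) := by unfold Spec_find_quadruples; infer_instance

-- ===== CLAIM (what is proved, stated in full; the proofs are below) =====
def Claim_equal_find_quadruples : Prop := ∀ (max_d : Int), Dom_find_quadruples max_d → Spec_find_quadruples max_d (find_quadruples max_d)

-- ===== LEMMAS AND PROOFS =====

-- the contribution of a single b to the quadruple list of a fixed (d, a)
def pvG (d a b : Int) : List (List Int) :=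
  if pvISqrt (d * d - a * a - b * b) * pvISqrt (d * d - a * a - b * b) = d * d - a * a - b * b ∧
      b ≤ pvISqrt (d * d - a * a - b * b) then
    [[a, b, pvISqrt (d * d - a * a - b * b), d]]
  else []

-- common normal form of both programs
def pvNorm (max_d : Int) : List (List Int) :=
  (PySem.List.pyRange 1 (max_d + 1) 1).foldl (fun quads d =>
    (PySem.List.pyRange 0 (d + 1) 1).foldl (fun quads a =>
      quads ++ (PySem.List.pyRange a (d + 1) 1).flatMap (pvG d a)) quads) []

lemma pvISqrt_nonneg (r : Int) : 0 ≤ pvISqrt r := Int.natCast_nonneg _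

lemma pvISqrt_of_sq (c : Int) (hc : 0 ≤ c) : pvISqrt (c * c) = c := by
  unfold pvISqrt
  rw [Int.toNat_mul hc hc, Nat.sqrt_eq, Int.toNat_of_nonneg hc]

lemma pvG_nil_of_neg {d a b : Int} (h : d * d - a * a - b * b < 0) : pvG d a b = [] := by
  unfold pvG
  split
  · next hcond =>
    exfalso
    have := mul_self_nonneg (pvISqrt (d * d - a * a - b * b))
    omega
  · rfl

lemma pvG_nil_of_gt {d a b : Int} (hd : 0 ≤ d) (hbd : d < b) : pvG d a b = [] := by
  unfold pvG
  split
  · next hcond =>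
    exfalso
    have hq : d < pvISqrt (d * d - a * a - b * b) := lt_of_lt_of_le hbd hcond.2
    have h1 : d * d < pvISqrt (d * d - a * a - b * b) * pvISqrt (d * d - a * a - b * b) :=
      mul_self_lt_mul_self hd hq
    have h2 := mul_self_nonneg a
    have h3 := mul_self_nonneg b
    omega
  · rfl

lemma pvBloopA_eq (d a : Int) (bs : List Int) (quads : List (List Int))
    (hsort : bs.Pairwise (· < ·)) (hpos : ∀ x ∈ bs, 0 ≤ x) :
    pvBloopA d a bs quads = quads ++ bs.flatMap (pvG d a) := by
  induction bs generalizing quads with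
  | nil => simp [pvBloopA]
  | cons b rest ih =>
    rw [pvBloopA]
    simp only
    split
    · next hneg =>
      have hnil : ∀ x ∈ b :: rest, pvG d a x = [] := by
        intro x hx
        rcases List.mem_cons.mp hx with rfl | hx
        · exact pvG_nil_of_neg hneg
        · have hb : 0 ≤ b := hpos b List.mem_cons_self
          have hbx : b < x := (List.pairwise_cons.mp hsort).1 x hx
          have : b * b ≤ x * x := mul_self_le_mul_self hb (le_of_lt hbx)
          exact pvG_nil_of_neg (by omega)
      rw [List.flatMap_eq_nil_iff.mpr hnil, List.append_nil]
    · next hge =>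
      rw [ih _ (List.pairwise_cons.mp hsort).2 (fun x hx => hpos x (List.mem_cons_of_mem _ hx))]
      have hstep : (if pvISqrt (d * d - a * a - b * b) * pvISqrt (d * d - a * a - b * b) =
            d * d - a * a - b * b ∧ b ≤ pvISqrt (d * d - a * a - b * b) then
            quads ++ [[a, b, pvISqrt (d * d - a * a - b * b), d]] else quads)
          = quads ++ pvG d a b := by
        unfold pvG
        split
        · rfl
        · rw [List.append_nil]
      rw [hstep, List.flatMap_cons, List.append_assoc]

lemma findA_eq_norm (max_d : Int) : find_quadruples max_d = pvNorm max_d := by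
  unfold find_quadruples pvNorm
  apply PySem.List.foldl_congr_mem
  intro acc d hd
  apply PySem.List.foldl_congr_mem
  intro acc2 a ha
  have ha' := PySem.List.mem_pyRange_one.mp ha
  exact pvBloopA_eq d a _ acc2 (PySem.List.pairwise_lt_pyRange_one a (d + 1))
    (fun x hx => by have := PySem.List.mem_pyRange_one.mp hx; omega)

-- the flat list of (b, c) pairs the table is built from
def pvPairs (max_d : Int) : List (Int × Int) :=
  (PySem.List.pyRange 0 (max_d + 1) 1).flatMap
    (fun b => (PySem.List.pyRange b (max_d + 1) 1).map (fun c => (b, c)))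

-- a nested build loop is the flat loop over the pairs it enumerates
lemma pvFoldlFoldl {α β γ : Type} (l : List α) (g : α → List β) (f : γ → α → β → γ) (init : γ) :
    l.foldl (fun t b => (g b).foldl (fun t c => f t b c) t) init
      = (l.flatMap (fun b => (g b).map (fun c => (b, c)))).foldl (fun t p => f t p.1 p.2) init := by
  induction l generalizing init with
  | nil => rfl
  | cons b rest ih =>
    simp only [List.flatMap_cons, List.foldl_append, List.foldl_map, List.foldl_cons]
    rw [ih]

lemma pvFilter_unique {α : Type} (l : List α) (p : α → Bool) (q : α) (hl : l.Nodup)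
    (h : ∀ c ∈ l, p c = true ↔ c = q) (hmem : q ∈ l) : l.filter p = [q] := by
  induction l with
  | nil => cases hmem
  | cons x t ih =>
    rcases List.mem_cons.mp hmem with hqx | hqt
    · rw [List.filter_cons_of_pos ((h x List.mem_cons_self).mpr hqx.symm)]
      have ht : t.filter p = [] := by
        rw [List.filter_eq_nil_iff]
        intro c hc hpc
        have hcq : c = q := (h c (List.mem_cons_of_mem _ hc)).mp hpc
        exact (List.nodup_cons.mp hl).1 ((hcq.trans hqx) ▸ hc)
      rw [ht, hqx]
    · have hxq : x ≠ q := fun he => (List.nodup_cons.mp hl).1 (he ▸ hqt)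
      have hx : p x = false := by
        cases hpx : p x
        · rfl
        · exact absurd ((h x List.mem_cons_self).mp hpx) hxq
      rw [List.filter_cons_of_neg (by simp [hx])]
      exact ih (List.nodup_cons.mp hl).2 (fun c hc => h c (List.mem_cons_of_mem _ hc)) hqt

lemma pvTable_getD (max_d s : Int) :
    (pvTable max_d).getD s [] = (pvPairs max_d).filter (fun p => p.1 * p.1 + p.2 * p.2 == s) := by
  unfold pvTable pvPairs
  rw [pvFoldlFoldl (PySem.List.pyRange 0 (max_d + 1) 1) (fun b => PySem.List.pyRange b (max_d + 1) 1)
      (fun t b c => t.modify (b * b + c * c) [] (· ++ [(b, c)]))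
      (PySem.Dict.empty : PySem.Dict Int (List (Int × Int)))]
  rw [show (fun (t : PySem.Dict Int (List (Int × Int))) (p : Int × Int) =>
        t.modify (p.1 * p.1 + p.2 * p.2) [] (· ++ [(p.1, p.2)]))
      = (fun t p => t.modify (p.1 * p.1 + p.2 * p.2) [] (· ++ [p])) from rfl]
  rw [← List.foldl_map (f := fun p : Int × Int => (p.1 * p.1 + p.2 * p.2, p))
       (g := fun (t : PySem.Dict Int (List (Int × Int))) p => t.modify p.1 [] (· ++ [p.2]))]
  rw [PySem.Dict.getD_foldl_modify_append]
  simp [List.filter_map, List.map_map, Function.comp_def]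

-- the per-b inner list coming out of the table equals pvG
lemma pvInner_eq (max_d d a b : Int) (ha : 0 ≤ a) (had : a ≤ d) (hd : d ≤ max_d) (hb : 0 ≤ b) :
    ((PySem.List.pyRange b (max_d + 1) 1).filter
        (fun c => b * b + c * c == d * d - a * a)).map (fun c => [a, b, c, d])
      = pvG d a b := by
  have hd0 : 0 ≤ d := le_trans ha had
  unfold pvG
  split
  · next hq =>
    obtain ⟨hq1, hq2⟩ := hq
    have hq0 : 0 ≤ pvISqrt (d * d - a * a - b * b) := pvISqrt_nonneg _
    have hqd : pvISqrt (d * d - a * a - b * b) ≤ d := by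
      by_contra hlt
      have h1 := mul_self_lt_mul_self hd0 (not_le.mp hlt)
      have h2 := mul_self_nonneg a
      have h3 := mul_self_nonneg b
      omega
    have hfil : (PySem.List.pyRange b (max_d + 1) 1).filter
        (fun c => b * b + c * c == d * d - a * a) = [pvISqrt (d * d - a * a - b * b)] := by
      apply pvFilter_unique _ _ _ (PySem.List.nodup_pyRange_one _ _)
      · intro c hc
        have hc' := PySem.List.mem_pyRange_one.mp hc
        have hc0 : 0 ≤ c := le_trans hb hc'.1
        constructor
        · intro hpc
          have hcc : c * c = d * d - a * a - b * b := by
            have := of_decide_eq_true (by simpa using hpc)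
            omega
          rw [← hcc, pvISqrt_of_sq c hc0]
        · intro hcq
          subst hcq
          simp only [beq_iff_eq]
          omega
      · exact PySem.List.mem_pyRange_one.mpr ⟨hq2, by omega⟩
    rw [hfil]
    rfl
  · next hq =>
    have hnil : (PySem.List.pyRange b (max_d + 1) 1).filter
        (fun c => b * b + c * c == d * d - a * a) = [] := by
      rw [List.filter_eq_nil_iff]
      intro c hc hpc
      have hc' := PySem.List.mem_pyRange_one.mp hc
      have hc0 : 0 ≤ c := le_trans hb hc'.1
      have hcc : c * c = d * d - a * a - b * b := by
        have : b * b + c * c = d * d - a * a := by simpa using hpc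
        omega
      exact hq ⟨by rw [← hcc, pvISqrt_of_sq c hc0], by rw [← hcc, pvISqrt_of_sq c hc0]; exact hc'.1⟩
    rw [hnil]
    rfl

lemma findB_eq_norm (max_d : Int) : find_quadruples_alt max_d = pvNorm max_d := by
  unfold find_quadruples_alt pvNorm
  show (PySem.List.pyRange 1 (max_d + 1) 1).foldl _ [] = _
  apply PySem.List.foldl_congr_mem
  intro acc d hd
  apply PySem.List.foldl_congr_mem
  intro acc2 a ha
  have hd' := PySem.List.mem_pyRange_one.mp hd
  have ha' := PySem.List.mem_pyRange_one.mp ha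
  have hd0 : 0 ≤ d := by omega
  rw [PySem.List.foldl_append_ite (p := fun bc : Int × Int => a ≤ bc.1)
      (f := fun bc : Int × Int => [a, bc.1, bc.2, d]), pvTable_getD]
  congr 1
  rw [List.filter_filter]
  unfold pvPairs
  rw [List.filter_flatMap, List.map_flatMap]
  rw [List.flatMap_congr (g := fun b => if a ≤ b then pvG d a b else []) ?hper]
  case hper =>
    intro b hb
    have hb' := PySem.List.mem_pyRange_one.mp hb
    beta_reduce
    by_cases hab : a ≤ b
    · rw [if_pos hab]
      rw [List.filter_map, List.map_map]
      have : ((fun (bc : Int × Int) => decide (a ≤ bc.1) && (bc.1 * bc.1 + bc.2 * bc.2 == d * d - a * a)) ∘ (fun c => (b, c)))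
          = (fun c => b * b + c * c == d * d - a * a) := by
        funext c
        simp [hab]
      rw [this]
      exact pvInner_eq max_d d a b (by omega) (by omega) (by omega) hb'.1
    · rw [if_neg hab]
      rw [List.filter_map]
      have : ((fun (bc : Int × Int) => decide (a ≤ bc.1) && (bc.1 * bc.1 + bc.2 * bc.2 == d * d - a * a)) ∘ (fun c => (b, c)))
          = (fun _ => false) := by
        funext c
        simp [hab]
      rw [this, List.filter_false, List.map_nil, List.map_nil]
  rw [PySem.List.pyRange_one_append 0 a (max_d + 1) ha'.1 (by omega),
      PySem.List.pyRange_one_append a (d + 1) (max_d + 1) (by omega) (by omega),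
      List.flatMap_append, List.flatMap_append]
  have hleft : (PySem.List.pyRange 0 a 1).flatMap (fun b => if a ≤ b then pvG d a b else []) = [] := by
    rw [List.flatMap_eq_nil_iff]
    intro b hb
    have hb' := PySem.List.mem_pyRange_one.mp hb
    rw [if_neg (by omega)]
  have hright : (PySem.List.pyRange (d + 1) (max_d + 1) 1).flatMap
      (fun b => if a ≤ b then pvG d a b else []) = [] := by
    rw [List.flatMap_eq_nil_iff]
    intro b hb
    have hb' := PySem.List.mem_pyRange_one.mp hb
    split
    · exact pvG_nil_of_gt hd0 (by omega)
    · rfl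
  have hmid : (PySem.List.pyRange a (d + 1) 1).flatMap
      (fun b => if a ≤ b then pvG d a b else []) = (PySem.List.pyRange a (d + 1) 1).flatMap (pvG d a) := by
    apply List.flatMap_congr
    intro b hb
    have hb' := PySem.List.mem_pyRange_one.mp hb
    rw [if_pos hb'.1]
  rw [hleft, hright, hmid, List.nil_append, List.append_nil]

-- ===== VERDICT (by name: the statement is the Claim_ definition above) =====
theorem find_quadruples_spec : Claim_equal_find_quadruples := by
  intro max_d _
  unfold Spec_find_quadruples
  rw [findA_eq_norm, findB_eq_norm]
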